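-- pv_equiv track=rewrite | github.com/FrostLace/hanoiui | ui.py | tileString
-- ===== SOURCE A (Python) =====
-- SPACECH = " "
--
-- TILECH = "▄"
--
-- POLECH = "█"
--
-- def tileString(num,max_num):
--     if num is not None:
--         radius = num + 2
--     else:
--         radius = 0
--     max_radius = max_num + 3
--     empty = max_radius - radius
--     first_half = ""
--     for ch in range(max_radius):
--         if ch < empty:
--             first_half += SPACECH
--         else:
--             first_half += TILECH
--     tile_string = first_half + POLECH + first_half[::-1]
--     return tile_string
-- ===== SOURCE B (Python) =====
-- SPACECH = " "
--
-- TILECH = "▄"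
--
-- POLECH = "█"
--
-- def tileString(num, max_num):
--     radius = num + 2 if num is not None else 0
--     w = max(max_num + 3, 0)
--     spaces = min(max(max_num + 3 - radius, 0), w)
--     return "".join(
--         POLECH if i == w else (SPACECH if min(i, 2 * w - i) < spaces else TILECH)
--         for i in range(2 * w + 1)
--     )
-- ===== Notes on version B (the rewrite author's own statement) =====
-- stated objective: alternative
-- what changed: Instead of building a half-string char by char and mirroring it, B emits the whole tile string in one pass over all 2*w+1 positions, picking each character by its distance from the nearest end (clamped space count), with no reversal step.
import Mathlib
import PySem

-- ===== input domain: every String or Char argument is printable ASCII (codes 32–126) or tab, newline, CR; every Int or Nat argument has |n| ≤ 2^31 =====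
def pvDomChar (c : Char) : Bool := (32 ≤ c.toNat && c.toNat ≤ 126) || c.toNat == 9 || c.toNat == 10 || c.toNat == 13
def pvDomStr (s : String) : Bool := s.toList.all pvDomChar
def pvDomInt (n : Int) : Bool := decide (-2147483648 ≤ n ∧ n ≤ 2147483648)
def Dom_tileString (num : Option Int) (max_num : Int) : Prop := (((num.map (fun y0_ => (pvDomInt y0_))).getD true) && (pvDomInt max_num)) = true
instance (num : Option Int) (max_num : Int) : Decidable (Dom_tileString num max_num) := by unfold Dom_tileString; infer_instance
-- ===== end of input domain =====

-- B emits the whole symmetric string in one pass, picking each char by its distance from the nearest end (no half+mirror); objective: alternative.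


-- ===== PORT A =====
-- literal transliteration of A: build first_half char by char over range(max_radius),
-- then first_half + POLECH + first_half[::-1] (reversal of a string = List.reverse)
def tileString (num : Option Int) (max_num : Int) : String :=
  let radius : Int := match num with | some n => n + 2 | none => 0
  let max_radius : Int := max_num + 3
  let empty : Int := max_radius - radius
  let first_half : List Char :=
    (PySem.List.pyRange 0 max_radius 1).foldl
      (fun acc ch => acc ++ [if ch < empty then ' ' else '▄']) []
  String.ofList (first_half ++ ['█'] ++ first_half.reverse)

-- ===== PORT B =====
-- literal transliteration of B: one pass over all 2*w+1 positions; the char at i is the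
-- pole at the centre, a space iff the distance to the nearest end is below the clamped space count
def tileString_alt (num : Option Int) (max_num : Int) : String :=
  let radius : Int := match num with | some n => n + 2 | none => 0
  let w : Int := max (max_num + 3) 0
  let spaces : Int := min (max (max_num + 3 - radius) 0) w
  String.ofList <|
    (PySem.List.pyRange 0 (2 * w + 1) 1).map
      (fun i => if i = w then '█' else if min i (2 * w - i) < spaces then ' ' else '▄')

-- ===== PRECONDITION & SPEC =====
def Spec_tileString (num : Option Int) (max_num : Int) (out : String) : Prop := out = tileString_alt num max_num
instance (num : Option Int) (max_num : Int) (out : String) : Decidable (Spec_tileString num max_num out) := by unfold Spec_tileString; infer_instance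

-- ===== CLAIM (what is proved, stated in full; the proofs are below) =====
def Claim_equal_tileString : Prop := ∀ (num : Option Int) (max_num : Int), Dom_tileString num max_num → Spec_tileString num max_num (tileString num max_num)

-- ===== LEMMAS AND PROOFS =====

-- a constant-valued map over range(a,b) is a replicate
theorem map_pyRange_const {α : Type} (a b : Int) (f : Int → α) (c : α)
    (h : ∀ x ∈ PySem.List.pyRange a b 1, f x = c) :
    (PySem.List.pyRange a b 1).map f = List.replicate (b - a).toNat c := by
  rw [List.map_congr_left h, List.map_const', PySem.List.length_pyRange_one]

-- A's half equals replicate spaces ' ' ++ replicate (w - spaces) '▄'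
theorem halfA_eq (empty m : Int) :
    (PySem.List.pyRange 0 m 1).map (fun ch => if ch < empty then ' ' else '▄')
      = List.replicate (min (max empty 0) (max m 0)).toNat ' '
        ++ List.replicate (max m 0 - min (max empty 0) (max m 0)).toNat '▄' := by
  set s : Int := min (max empty 0) (max m 0) with hs
  by_cases hm : m ≤ 0
  · rw [PySem.List.pyRange_one_eq_nil hm]
    have : max m 0 = 0 := by omega
    simp [this, show s = 0 by omega]
  · rw [not_le] at hm
    have h0s : (0:Int) ≤ s := by omega
    have hsm : s ≤ m := by omega
    rw [PySem.List.pyRange_one_append 0 s m h0s hsm, List.map_append]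
    rw [map_pyRange_const 0 s _ ' ' (by
      intro x hx
      rw [PySem.List.mem_pyRange_one] at hx
      have : x < empty := by omega
      simp [this])]
    rw [map_pyRange_const s m _ '▄' (by
      intro x hx
      rw [PySem.List.mem_pyRange_one] at hx
      have : ¬ x < empty := by omega
      simp [this])]
    have : max m 0 = m := by omega
    simp [this]

-- B's single pass equals the same canonical five-segment string
theorem full_eq (w s : Int) (hw : 0 ≤ w) (h0 : 0 ≤ s) (hsw : s ≤ w) :
    (PySem.List.pyRange 0 (2 * w + 1) 1).map
        (fun i => if i = w then '█' else if min i (2 * w - i) < s then ' ' else '▄')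
      = List.replicate s.toNat ' ' ++ List.replicate (w - s).toNat '▄'
        ++ ['█'] ++ List.replicate (w - s).toNat '▄' ++ List.replicate s.toNat ' ' := by
  rw [PySem.List.pyRange_one_append 0 s (2 * w + 1) (by omega) (by omega), List.map_append,
      PySem.List.pyRange_one_append s w (2 * w + 1) (by omega) (by omega), List.map_append,
      PySem.List.pyRange_one_append w (w + 1) (2 * w + 1) (by omega) (by omega), List.map_append,
      PySem.List.pyRange_one_append (w + 1) (2 * w + 1 - s) (2 * w + 1) (by omega) (by omega),
      List.map_append]
  rw [map_pyRange_const 0 s _ ' ' (by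
    intro x hx; rw [PySem.List.mem_pyRange_one] at hx
    rw [if_neg (by omega), if_pos (by omega)])]
  rw [map_pyRange_const s w _ '▄' (by
    intro x hx; rw [PySem.List.mem_pyRange_one] at hx
    rw [if_neg (by omega), if_neg (by omega)])]
  rw [map_pyRange_const w (w + 1) _ '█' (by
    intro x hx; rw [PySem.List.mem_pyRange_one] at hx
    rw [if_pos (by omega)])]
  rw [map_pyRange_const (w + 1) (2 * w + 1 - s) _ '▄' (by
    intro x hx; rw [PySem.List.mem_pyRange_one] at hx
    rw [if_neg (by omega), if_neg (by omega)])]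
  rw [map_pyRange_const (2 * w + 1 - s) (2 * w + 1) _ ' ' (by
    intro x hx; rw [PySem.List.mem_pyRange_one] at hx
    rw [if_neg (by omega), if_pos (by omega)])]
  have h1 : (w + 1 - w).toNat = 1 := by omega
  have h2 : (2 * w + 1 - s - (w + 1)).toNat = (w - s).toNat := by omega
  have h3 : (2 * w + 1 - (2 * w + 1 - s)).toNat = s.toNat := by omega
  have h4 : (s - 0).toNat = s.toNat := by omega
  have h5 : (w - s).toNat = (w - s).toNat := rfl
  rw [h1, h2, h3, h4]
  simp [List.append_assoc, List.replicate]

-- the two list-level results coincide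
theorem core_eq (e m : Int) :
    ((PySem.List.pyRange 0 m 1).map (fun ch => if ch < e then ' ' else '▄'))
        ++ ['█'] ++ ((PySem.List.pyRange 0 m 1).map (fun ch => if ch < e then ' ' else '▄')).reverse
      = (PySem.List.pyRange 0 (2 * max m 0 + 1) 1).map
          (fun i => if i = max m 0 then '█'
            else if min i (2 * max m 0 - i) < min (max e 0) (max m 0) then ' ' else '▄') := by
  rw [halfA_eq, full_eq (max m 0) (min (max e 0) (max m 0)) (by omega) (by omega) (by omega)]
  simp [List.append_assoc, List.reverse_append]

-- ===== VERDICT (by name: the statement is the Claim_ definition above) =====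
theorem tileString_spec : Claim_equal_tileString := by
  intro num max_num _
  unfold Spec_tileString tileString tileString_alt
  cases num <;> dsimp only <;> exact congrArg String.ofList
    (by rw [PySem.List.foldl_append_singleton_eq_map, List.nil_append]; exact core_eq _ _)
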